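-- pv_equiv track=rewrite | github.com/w4nderwaffe/AOIS | LAB1/src/number_repr/bit_array.py | compare_unsigned
-- ===== SOURCE A (Python) =====
-- def compare_unsigned(a, b):
--     if len(a) != len(b):
--         raise ValueError('Bit arrays must have equal length')
--     for left, right in zip(a, b):
--         if left < right:
--             return -1
--         if left > right:
--             return 1
--     return 0
-- ===== SOURCE B (Python) =====
-- def compare_unsigned(a, b):
--     if len(a) != len(b):
--         raise ValueError('Bit arrays must have equal length')
--     return (a > b) - (a < b)
-- ===== Notes on version B (the rewrite author's own statement) =====
-- stated objective: idiomatic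
-- what changed: Replaces the explicit early-exit element loop with Python's built-in lexicographic sequence comparison, computing the sign as (a > b) - (a < b); the length guard is kept.
import Mathlib
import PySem

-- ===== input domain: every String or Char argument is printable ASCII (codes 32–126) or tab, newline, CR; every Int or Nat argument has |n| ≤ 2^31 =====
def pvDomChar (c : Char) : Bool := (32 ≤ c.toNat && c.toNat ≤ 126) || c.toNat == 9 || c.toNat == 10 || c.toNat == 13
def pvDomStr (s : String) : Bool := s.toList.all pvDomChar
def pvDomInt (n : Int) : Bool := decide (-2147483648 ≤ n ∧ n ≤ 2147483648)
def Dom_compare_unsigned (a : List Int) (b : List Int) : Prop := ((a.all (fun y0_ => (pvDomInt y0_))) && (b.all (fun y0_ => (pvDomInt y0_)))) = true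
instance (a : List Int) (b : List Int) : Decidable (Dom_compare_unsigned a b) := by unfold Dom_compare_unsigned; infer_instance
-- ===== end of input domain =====

-- B replaces A's explicit early-exit loop with Python's built-in lexicographic list comparison, (a > b) - (a < b); same cost, more idiomatic.
-- ===== PORT A =====
-- early-exit loop over zip(a, b); Pre_ excludes mismatched lengths, where A raises ValueError
def cuLoop : List (Int × Int) → Int
  | [] => 0
  | (l, r) :: rest => if l < r then -1 else if l > r then 1 else cuLoop rest

def compare_unsigned (a : List Int) (b : List Int) : Int := cuLoop (a.zip b)

-- ===== PORT B =====
-- Python's lexicographic '<' on lists of ints (exact on equal-length lists, the Pre_ domain)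
def listLt : List Int → List Int → Bool
  | [], [] => false
  | [], _ :: _ => true
  | _ :: _, [] => false
  | x :: xs, y :: ys => if x < y then true else if y < x then false else listLt xs ys

def compare_unsigned_alt (a : List Int) (b : List Int) : Int :=
  (if listLt b a then (1 : Int) else 0) - (if listLt a b then (1 : Int) else 0)

-- ===== PRECONDITION & SPEC =====
-- A raises ValueError when the lengths differ; Pre_ excludes exactly those inputs.
def Pre_compare_unsigned (a : List Int) (b : List Int) : Prop := a.length = b.length
instance (a : List Int) (b : List Int) : Decidable (Pre_compare_unsigned a b) := by unfold Pre_compare_unsigned; infer_instance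
def pvWitness_compare_unsigned : List Int × List Int := ([1, 0], [0, 1])
def Spec_compare_unsigned (a : List Int) (b : List Int) (out : Int) : Prop := out = compare_unsigned_alt a b
instance (a : List Int) (b : List Int) (out : Int) : Decidable (Spec_compare_unsigned a b out) := by unfold Spec_compare_unsigned; infer_instance

-- ===== CLAIM (what is proved, stated in full; the proofs are below) =====
def Claim_equal_compare_unsigned : Prop := ∀ (a : List Int) (b : List Int), Dom_compare_unsigned a b → Pre_compare_unsigned a b → Spec_compare_unsigned a b (compare_unsigned a b)

-- ===== LEMMAS AND PROOFS =====
lemma cuLoop_eq_alt (a b : List Int) (h : a.length = b.length) :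
    compare_unsigned a b = compare_unsigned_alt a b := by
  induction a generalizing b with
  | nil =>
    cases b with
    | nil => decide
    | cons y ys => simp at h
  | cons x xs ih =>
    cases b with
    | nil => simp at h
    | cons y ys =>
      simp only [List.length_cons, Nat.add_right_cancel_iff] at h
      simp only [compare_unsigned, compare_unsigned_alt, List.zip_cons_cons, cuLoop, listLt]
      rcases lt_trichotomy x y with hlt | heq | hgt
      · simp [hlt, not_lt.2 (le_of_lt hlt)]
      · subst heq
        simp only [lt_irrefl, if_false]
        exact ih ys h
      · simp [hgt, not_lt.2 (le_of_lt hgt)]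

-- ===== VERDICT (by name: the statement is the Claim_ definition above) =====
theorem compare_unsigned_spec : Claim_equal_compare_unsigned := by
  intro a b _ hpre
  unfold Spec_compare_unsigned
  exact cuLoop_eq_alt a b hpre
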